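-- pv_equiv track=rewrite | github.com/pro465/research | cost.py | m
-- ===== SOURCE A (Python) =====
-- def m(n):
--     a=[0]*(n+1)
--     for i in range(2, n+1):
--         a[i]=a[i-1]+1
--         for f in range(2, i):
--             if i%f==0:
--                 a[i]=min(a[i], a[i//f]+a[f])
--
--     return a
-- ===== SOURCE B (Python) =====
-- def m(n):
--     a = [0] * (n + 1)
--     for i in range(2, n + 1):
--         best = a[i - 1] + 1
--         f = 2
--         while f * f <= i:
--             if i % f == 0:
--                 best = min(best, a[i // f] + a[f])
--             f += 1
--         a[i] = best
--     return a
-- ===== Notes on version B (the rewrite author's own statement) =====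
-- stated objective: faster
-- what changed: The inner scan over all candidate factors 2..i-1 is replaced by a while loop over factors f with f*f <= i, using the divisor pair (f, i//f) so each divisor pair is inspected once.
import Mathlib
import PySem

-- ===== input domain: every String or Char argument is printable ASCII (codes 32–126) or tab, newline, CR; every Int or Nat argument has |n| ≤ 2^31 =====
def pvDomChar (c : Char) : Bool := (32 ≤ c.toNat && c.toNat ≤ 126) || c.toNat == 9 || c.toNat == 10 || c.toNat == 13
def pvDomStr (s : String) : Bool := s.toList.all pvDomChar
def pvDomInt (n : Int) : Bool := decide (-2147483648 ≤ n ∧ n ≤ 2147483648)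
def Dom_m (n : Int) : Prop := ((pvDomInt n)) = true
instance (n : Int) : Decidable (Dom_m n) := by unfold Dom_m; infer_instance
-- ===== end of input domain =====

-- B replaces A's O(n^2) inner scan over all candidate factors 2..i-1 by a while loop over
-- factors f with f*f ≤ i, using the divisor pair (f, i//f): O(n·sqrt n), measured faster.

-- ===== PORT A =====
def m (n : Int) : List Int :=
  (PySem.List.pyRange 2 (n + 1) 1).foldl
    (fun a i =>
      let a := a.set i.toNat (a.getD (i - 1).toNat 0 + 1)
      (PySem.List.pyRange 2 i 1).foldl
        (fun a f =>
          if PySem.Int.mod i f = 0 then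
            a.set i.toNat
              (min (a.getD i.toNat 0)
                (a.getD (PySem.Int.floordiv i f).toNat 0 + a.getD f.toNat 0))
          else a)
        a)
    (List.replicate (n + 1).toNat 0)

-- ===== PORT B =====
-- the while loop 'f = 2; while f*f <= i: ... f += 1' of Source B
def mWhile (a : List Int) (i f best : Int) : Int :=
  if _h : f * f ≤ i then
    mWhile a i (f + 1)
      (if PySem.Int.mod i f = 0 then
        min best (a.getD (PySem.Int.floordiv i f).toNat 0 + a.getD f.toNat 0)
      else best)
  else best
termination_by (i + 1 - f).toNat
decreasing_by
  have hf : f ≤ f * f := by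
    by_cases h0 : f ≤ 0
    · nlinarith
    · nlinarith
  omega

def m_alt (n : Int) : List Int :=
  (PySem.List.pyRange 2 (n + 1) 1).foldl
    (fun a i => a.set i.toNat (mWhile a i 2 (a.getD (i - 1).toNat 0 + 1)))
    (List.replicate (n + 1).toNat 0)

-- ===== PRECONDITION & SPEC =====
def Spec_m (n : Int) (out : List Int) : Prop := out = m_alt n
instance (n : Int) (out : List Int) : Decidable (Spec_m n out) := by unfold Spec_m; infer_instance

-- ===== CLAIM (what is proved, stated in full; the proofs are below) =====
def Claim_equal_m : Prop := ∀ (n : Int), Dom_m n → Spec_m n (m n)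

-- ===== LEMMAS AND PROOFS =====

-- candidate value contributed by factor f at index i, read from array a
def gv (a : List Int) (i f : Int) : Int :=
  a.getD (PySem.Int.floordiv i f).toNat 0 + a.getD f.toNat 0

-- A's inner loop as a pure value fold
def vfA (a : List Int) (i : Int) (v0 : Int) : Int :=
  (PySem.List.pyRange 2 i 1).foldl
    (fun v f => if PySem.Int.mod i f = 0 then min v (gv a i f) else v) v0

theorem gv_swap (a : List Int) (i f d : Int) (hd : 0 < d) (hf : 0 < f)
    (hdf : d * f = i) : gv a i f = gv a i d := by
  have h1 : PySem.Int.floordiv i f = d := by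
    rw [PySem.Int.floordiv_eq_ediv_of_pos hf, ← hdf, Int.mul_ediv_cancel _ (by omega)]
  have h2 : PySem.Int.floordiv i d = f := by
    rw [PySem.Int.floordiv_eq_ediv_of_pos hd, ← hdf, Int.mul_ediv_cancel_left _ (by omega)]
  simp [gv, h1, h2, Int.add_comm]

-- (1) A's inner loop over the list-state only rewrites slot i.toNat
theorem innerA_set (i : Int) (hi : 2 ≤ i) :
    ∀ (l : List Int), (∀ f ∈ l, 2 ≤ f ∧ f < i) → ∀ (a : List Int) (v : Int),
      i.toNat < a.length →
      l.foldl
        (fun a f =>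
          if PySem.Int.mod i f = 0 then
            a.set i.toNat
              (min (a.getD i.toNat 0)
                (a.getD (PySem.Int.floordiv i f).toNat 0 + a.getD f.toNat 0))
          else a)
        (a.set i.toNat v)
      = a.set i.toNat
          (l.foldl (fun v f => if PySem.Int.mod i f = 0 then min v (gv a i f) else v) v) := by
  intro l
  induction l with
  | nil => intro _ a v _; simp
  | cons f t ih =>
    intro hmem a v hlen
    have hf := hmem f (by simp)
    have hfd : PySem.Int.floordiv i f < i := by
      rw [PySem.Int.floordiv_eq_ediv_of_pos (by omega : (0:Int) < f)]
      have hq0 : 0 ≤ i / f := Int.ediv_nonneg (by omega) (by omega)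
      have hqf : i / f * f ≤ i := Int.ediv_mul_le i (by omega)
      nlinarith
    have hfd0 : 0 ≤ PySem.Int.floordiv i f := by
      rw [PySem.Int.floordiv_eq_ediv_of_pos (by omega : (0:Int) < f)]
      exact Int.ediv_nonneg (by omega) (by omega)
    have hget : ∀ (k : Int), 0 ≤ k → k < i →
        (a.set i.toNat v).getD k.toNat 0 = a.getD k.toNat 0 := by
      intro k hk0 hki
      have : k.toNat ≠ i.toNat := by omega
      simp [List.getD_eq_getElem?_getD, List.getElem?_set_ne (Ne.symm this)]
    have hgeti : (a.set i.toNat v).getD i.toNat 0 = v := by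
      simp [List.getD_eq_getElem?_getD, List.getElem?_set_self hlen]
    simp only [List.foldl_cons]
    by_cases hmod : PySem.Int.mod i f = 0
    · rw [if_pos hmod, if_pos hmod]
      rw [hget f (by omega) hf.2, hget _ hfd0 hfd, hgeti, List.set_set]
      exact ih (fun x hx => hmem x (by simp [hx])) a _ hlen
    · rw [if_neg hmod, if_neg hmod]
      exact ih (fun x hx => hmem x (by simp [hx])) a v hlen

-- (2) bounds for the pure value fold
theorem vf_le_init (a : List Int) (i : Int) :
    ∀ (l : List Int) (v0 : Int),
      l.foldl (fun v f => if PySem.Int.mod i f = 0 then min v (gv a i f) else v) v0 ≤ v0 := by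
  intro l
  induction l with
  | nil => intro v0; simp
  | cons f t ih =>
    intro v0
    simp only [List.foldl_cons]
    by_cases hmod : PySem.Int.mod i f = 0
    · rw [if_pos hmod]
      exact le_trans (ih _) (min_le_left _ _)
    · rw [if_neg hmod]; exact ih _

theorem vf_le_mem (a : List Int) (i : Int) :
    ∀ (l : List Int) (v0 f : Int), f ∈ l → PySem.Int.mod i f = 0 →
      l.foldl (fun v g => if PySem.Int.mod i g = 0 then min v (gv a i g) else v) v0
        ≤ gv a i f := by
  intro l
  induction l with
  | nil => intro _ _ h; simp at h
  | cons g t ih =>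
    intro v0 f hmem hmod
    simp only [List.foldl_cons]
    rcases List.mem_cons.mp hmem with h | h
    · subst h
      rw [if_pos hmod]
      exact le_trans (vf_le_init a i t _) (min_le_right _ _)
    · exact ih _ f h hmod

theorem vf_ge (a : List Int) (i : Int) :
    ∀ (l : List Int) (v0 c : Int), c ≤ v0 →
      (∀ f ∈ l, PySem.Int.mod i f = 0 → c ≤ gv a i f) →
      c ≤ l.foldl (fun v f => if PySem.Int.mod i f = 0 then min v (gv a i f) else v) v0 := by
  intro l
  induction l with
  | nil => intro v0 c h _; simpa using h
  | cons f t ih =>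
    intro v0 c hc hall
    simp only [List.foldl_cons]
    by_cases hmod : PySem.Int.mod i f = 0
    · rw [if_pos hmod]
      exact ih _ c (le_min hc (hall f (by simp) hmod)) (fun x hx => hall x (by simp [hx]))
    · rw [if_neg hmod]
      exact ih _ c hc (fun x hx => hall x (by simp [hx]))

-- (3) bounds for the while loop
theorem mWhile_le_init (a : List Int) (i : Int) :
    ∀ (f best : Int), mWhile a i f best ≤ best := by
  intro f best
  induction f, best using mWhile.induct a i with
  | case1 f best h ih =>
    rw [mWhile, dif_pos h]
    refine le_trans ih ?_
    by_cases hmod : PySem.Int.mod i f = 0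
    · rw [dif_pos hmod]; exact min_le_left _ _
    · rw [dif_neg hmod]
  | case2 f best h => rw [mWhile, dif_neg h]

theorem mWhile_le_mem (a : List Int) (i f' : Int) :
    ∀ (f best : Int), 2 ≤ f → f ≤ f' → f' * f' ≤ i → PySem.Int.mod i f' = 0 →
      mWhile a i f best ≤ gv a i f' := by
  intro f best
  induction f, best using mWhile.induct a i with
  | case1 f best h ih =>
    intro h2 hle hsq hmod
    rw [mWhile, dif_pos h]
    by_cases heq : f = f'
    · subst heq
      refine le_trans (mWhile_le_init a i _ _) ?_
      rw [if_pos hmod]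
      exact min_le_right _ _
    · exact ih (by omega) (by omega) hsq hmod
  | case2 f best h =>
    intro h2 hle hsq hmod
    exfalso
    have : f * f ≤ f' * f' := by nlinarith
    omega

theorem mWhile_ge (a : List Int) (i : Int) :
    ∀ (f best c : Int), c ≤ best →
      (∀ f', f ≤ f' → f' * f' ≤ i → PySem.Int.mod i f' = 0 → c ≤ gv a i f') →
      c ≤ mWhile a i f best := by
  intro f best c
  induction f, best using mWhile.induct a i with
  | case1 f best h ih =>
    intro hc hall
    rw [mWhile, dif_pos h]
    refine ih ?_ (fun f' h1 h2 h3 => hall f' (by omega) h2 h3)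
    by_cases hmod : PySem.Int.mod i f = 0
    · rw [dif_pos hmod]
      exact le_min hc (hall f le_rfl h hmod)
    · rwa [dif_neg hmod]
  | case2 f best h =>
    intro hc hall
    rw [mWhile, dif_neg h]; exact hc

-- (4) key value equality: A's full inner scan = B's sqrt-bounded while loop
theorem vfA_eq_mWhile (a : List Int) (i v0 : Int) (hi : 2 ≤ i) :
    vfA a i v0 = mWhile a i 2 v0 := by
  apply le_antisymm
  · apply mWhile_ge
    · exact vf_le_init a i _ v0
    · intro f' h2 hsq hmod
      have h2f : 2 * f' ≤ f' * f' := by nlinarith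
      have hmem : f' ∈ PySem.List.pyRange 2 i 1 := by
        rw [PySem.List.mem_pyRange_one]
        omega
      exact vf_le_mem a i _ v0 f' hmem hmod
  · apply vf_ge
    · exact mWhile_le_init a i 2 v0
    · intro f hmem hmod
      rw [PySem.List.mem_pyRange_one] at hmem
      have hdvd : f ∣ i := (PySem.Int.mod_eq_zero_iff_dvd i f).mp hmod
      by_cases hsq : f * f ≤ i
      · exact mWhile_le_mem a i f 2 v0 le_rfl (by omega) hsq hmod
      · -- use the cofactor d = i / f, which satisfies d * d ≤ i
        obtain ⟨d, hd⟩ := hdvd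
        have hd1 : 0 < d := by
          by_cases h0 : d ≤ 0
          · nlinarith
          · omega
        have hd2 : 2 ≤ d := by
          by_cases h0 : d < 2
          · have hd1' : d = 1 := by omega
            rw [hd1', mul_one] at hd
            omega
          · omega
        have hdlt : d < f := by nlinarith
        have hdsq : d * d ≤ i := by
          nlinarith [mul_le_mul_of_nonneg_left hdlt.le hd1.le]
        have hmodd : PySem.Int.mod i d = 0 := by
          rw [PySem.Int.mod_eq_zero_iff_dvd i d]
          exact ⟨f, by linarith [mul_comm f d]⟩
        have := mWhile_le_mem a i d 2 v0 le_rfl (by omega) hdsq hmodd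
        rwa [← gv_swap a i f d hd1 (by omega) (by linarith [mul_comm f d])] at this

-- (5) outer loops agree step by step
theorem outer_eq :
    ∀ (l : List Int) (a : List Int), (∀ i ∈ l, 2 ≤ i ∧ i.toNat < a.length) →
      l.foldl
        (fun a i =>
          let a' := a.set i.toNat (a.getD (i - 1).toNat 0 + 1)
          (PySem.List.pyRange 2 i 1).foldl
            (fun a f =>
              if PySem.Int.mod i f = 0 then
                a.set i.toNat
                  (min (a.getD i.toNat 0)
                    (a.getD (PySem.Int.floordiv i f).toNat 0 + a.getD f.toNat 0))
              else a)
            a')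
        a
      = l.foldl
          (fun a i => a.set i.toNat (mWhile a i 2 (a.getD (i - 1).toNat 0 + 1)))
          a := by
  intro l
  induction l with
  | nil => intro a _; rfl
  | cons i t ih =>
    intro a hmem
    have hi := hmem i (by simp)
    have hrange : ∀ f ∈ PySem.List.pyRange 2 i 1, 2 ≤ f ∧ f < i := by
      intro f hf
      rw [PySem.List.mem_pyRange_one] at hf
      exact hf
    simp only [List.foldl_cons]
    rw [innerA_set i hi.1 _ hrange a _ hi.2]
    rw [show (PySem.List.pyRange 2 i 1).foldl
          (fun v f => if PySem.Int.mod i f = 0 then min v (gv a i f) else v)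
          (a.getD (i - 1).toNat 0 + 1)
        = mWhile a i 2 (a.getD (i - 1).toNat 0 + 1)
      from vfA_eq_mWhile a i _ hi.1]
    exact ih _ (by intro x hx; have := hmem x (by simp [hx]); simpa using this)

-- ===== VERDICT (by name: the statement is the Claim_ definition above) =====
theorem m_spec : Claim_equal_m := by
  intro n _
  unfold Spec_m m m_alt
  apply outer_eq
  intro i hi
  rw [PySem.List.mem_pyRange_one] at hi
  constructor
  · exact hi.1
  · simp only [List.length_replicate]
    omega
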